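-- pv_equiv track=rewrite | github.com/MrBrantCode/unitest_baseline | mut_generate/mist_train_cf/cf_12729/solution.py | longest_word_without_duplicates
-- ===== SOURCE A (Python) =====
-- def longest_word_without_duplicates(sentence):
--     # Split the sentence into words
--     words = sentence.split()
--
--     # Initialize variables to store the longest word and its length
--     longest_word = ''
--     longest_length = 0
--
--     # Iterate over each word in the sentence
--     for word in words:
--         # Check if the word contains duplicate letters
--         if len(set(word)) == len(word):
--             # Check if the length of the current word is greater than the longest word found so far
--             if len(word) > longest_length:
--                 longest_word = word
--                 longest_length = len(word)
--
--     return longest_word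
-- ===== SOURCE B (Python) =====
-- def longest_word_without_duplicates(sentence):
--     # Sort the words by length, longest first (stable: ties keep original order),
--     # and return the first word whose letters are all distinct.
--     words = sorted(sentence.split(), key=len, reverse=True)
--     return next((w for w in words if len(set(w)) == len(w)), '')
-- ===== Notes on version B (the rewrite author's own statement) =====
-- stated objective: alternative
-- what changed: Replaces the running-max accumulator loop with a stable length-descending sort followed by taking the first all-distinct-letters word.
import Mathlib
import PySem

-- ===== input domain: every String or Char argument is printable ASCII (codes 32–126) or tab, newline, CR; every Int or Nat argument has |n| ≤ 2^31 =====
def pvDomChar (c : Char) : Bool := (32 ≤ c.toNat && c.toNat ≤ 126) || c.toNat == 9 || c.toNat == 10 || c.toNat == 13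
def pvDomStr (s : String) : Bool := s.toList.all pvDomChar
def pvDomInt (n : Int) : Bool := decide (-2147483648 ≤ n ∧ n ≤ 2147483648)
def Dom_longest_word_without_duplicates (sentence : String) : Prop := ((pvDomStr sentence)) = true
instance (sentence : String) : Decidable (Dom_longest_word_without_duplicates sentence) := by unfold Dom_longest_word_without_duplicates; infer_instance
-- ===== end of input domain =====

-- B replaces A's running-max accumulator loop by a stable length-descending sort followed by
-- taking the first all-distinct-letters word; return values proved equal everywhere.

-- ===== PORT A =====
def longest_word_without_duplicates (sentence : String) : String :=
  let words := PySem.Str.split₀ sentence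
  let st := words.foldl (fun (st : String × Int) word =>
    if PySem.Set.len (PySem.Set.ofList word.toList) = PySem.Str.len word then
      if PySem.Str.len word > st.2 then (word, PySem.Str.len word) else st
    else st) ("", 0)
  st.1

-- ===== PORT B =====
def longest_word_without_duplicates_alt (sentence : String) : String :=
  let words := PySem.List.sorted (PySem.Str.split₀ sentence) (fun w => PySem.Str.len w) true
  match words.find? (fun w => PySem.Set.len (PySem.Set.ofList w.toList) == PySem.Str.len w) with
  | some w => w
  | none => ""

-- ===== PRECONDITION & SPEC =====
def Spec_longest_word_without_duplicates (sentence : String) (out : String) : Prop := out = longest_word_without_duplicates_alt sentence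
instance (sentence : String) (out : String) : Decidable (Spec_longest_word_without_duplicates sentence out) := by unfold Spec_longest_word_without_duplicates; infer_instance

-- ===== CLAIM (what is proved, stated in full; the proofs are below) =====
def Claim_equal_longest_word_without_duplicates : Prop := ∀ (sentence : String), Dom_longest_word_without_duplicates sentence → Spec_longest_word_without_duplicates sentence (longest_word_without_duplicates sentence)

-- ===== LEMMAS AND PROOFS =====

-- the distinct-letters predicate and the length key shared by both ports
def pvP (w : String) : Bool := PySem.Set.len (PySem.Set.ofList w.toList) == PySem.Str.len w
def pvKey (w : String) : Int := PySem.Str.len w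

-- A's fold state as a function of the first all-distinct word of the sorted list
def pvSt (o : Option String) : String × Int :=
  match o with
  | some b => (b, pvKey b)
  | none => ("", 0)

theorem pvKey_zero {w : String} (h : ¬ pvKey w > 0) : w = "" := by
  have ht : w.toList = [] := by
    have h1 : pvKey w = (w.toList.length : Int) := by simp [pvKey, PySem.Str.len_eq]
    have h2 : w.toList.length = 0 := by omega
    exact List.eq_nil_of_length_eq_zero h2
  exact String.toList_inj.mp ht

-- first p-element after an insertBy insertion into a key-descending list
theorem pvFind_insertBy (w : String) (l : List String)
    (hp : l.Pairwise (fun a b => pvKey b ≤ pvKey a)) :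
    (PySem.List.insertBy (fun a b => decide (pvKey b < pvKey a)) w l).find? pvP =
      match l.find? pvP with
      | some b => if pvP w = true ∧ pvKey b < pvKey w then some w else some b
      | none => if pvP w = true then some w else none := by
  induction l with
  | nil =>
    by_cases hw : pvP w = true <;> simp [PySem.List.insertBy, List.find?, hw]
  | cons y ys ih =>
    have hy : ∀ b ∈ y :: ys, pvKey b ≤ pvKey y := by
      intro b hb
      rcases List.mem_cons.mp hb with rfl | hb'
      · exact le_refl _
      · exact (List.pairwise_cons.mp hp).1 b hb'
    have htail := (List.pairwise_cons.mp hp).2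
    by_cases hlt : pvKey y < pvKey w
    · have hins : PySem.List.insertBy (fun a b => decide (pvKey b < pvKey a)) w (y :: ys) =
          w :: y :: ys := by
        simp [PySem.List.insertBy, hlt]
      rw [hins]
      by_cases hw : pvP w = true
      · rw [List.find?_cons_of_pos hw]
        cases hfind : (y :: ys).find? pvP with
        | none => simp [hw]
        | some b =>
          have hb : pvKey b < pvKey w :=
            lt_of_le_of_lt (hy b (List.mem_of_find?_eq_some hfind)) hlt
          simp [hw, hb]
      · rw [List.find?_cons_of_neg (by simpa using hw)]
        cases hfind : (y :: ys).find? pvP with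
        | none => simp [hw]
        | some b => simp [hw]
    · have hins : PySem.List.insertBy (fun a b => decide (pvKey b < pvKey a)) w (y :: ys) =
          y :: PySem.List.insertBy (fun a b => decide (pvKey b < pvKey a)) w ys := by
        simp [PySem.List.insertBy, hlt]
      rw [hins]
      by_cases hpy : pvP y = true
      · rw [List.find?_cons_of_pos hpy, List.find?_cons_of_pos hpy]
        have : ¬ (pvP w = true ∧ pvKey y < pvKey w) := fun h => hlt h.2
        simp [this]
      · rw [List.find?_cons_of_neg (by simpa using hpy),
          List.find?_cons_of_neg (by simpa using hpy)]
        exact ih htail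

-- main invariant: A's fold state is determined by the first p-element of the sorted words
theorem pvInvariant (ws : List String) :
    ws.foldl (fun (st : String × Int) word =>
        if PySem.Set.len (PySem.Set.ofList word.toList) = PySem.Str.len word then
          if PySem.Str.len word > st.2 then (word, PySem.Str.len word) else st
        else st) ("", 0)
      = pvSt ((PySem.List.sorted ws pvKey true).find? pvP) := by
  induction ws using List.reverseRecOn with
  | nil => simp [PySem.List.sorted, pvSt]
  | append_singleton ws w ih =>
    have hsorted : PySem.List.sorted (ws ++ [w]) pvKey true =
        PySem.List.insertBy (fun a b => decide (pvKey b < pvKey a)) w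
          (PySem.List.sorted ws pvKey true) := by
      rw [PySem.List.sorted_rev_eq_foldl_insertBy, PySem.List.sorted_rev_eq_foldl_insertBy,
        List.foldl_append]
      simp
    have hpair : (PySem.List.sorted ws pvKey true).Pairwise (fun a b => pvKey b ≤ pvKey a) :=
      PySem.List.sorted_pairwise_rev ws pvKey
    rw [List.foldl_append, List.foldl_cons, List.foldl_nil, ih, hsorted]
    cases hfind : (PySem.List.sorted ws pvKey true).find? pvP with
    | some b =>
      rw [pvFind_insertBy w _ hpair, hfind]
      by_cases hw : pvP w = true
      · have hw' : PySem.Set.len (PySem.Set.ofList w.toList) = PySem.Str.len w := by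
          unfold pvP at hw; exact eq_of_beq hw
        by_cases hlt : pvKey b < pvKey w
        · simp [pvKey, PySem.Str.len_eq] at hw' hlt
          simp [pvSt, pvKey, PySem.Str.len_eq, hw, hw', hlt]
        · simp [pvKey, PySem.Str.len_eq] at hw' hlt
          have hnlt : ¬ b.length < w.length := by omega
          simp [pvSt, pvKey, PySem.Str.len_eq, hw, hw', hnlt]
      · have hw' : ¬ PySem.Set.len (PySem.Set.ofList w.toList) = PySem.Str.len w := by
          intro hc; exact hw (by unfold pvP; exact beq_iff_eq.mpr hc)
        simp [pvKey, PySem.Str.len_eq] at hw'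
        simp [pvSt, pvKey, PySem.Str.len_eq, hw, hw']
    | none =>
      rw [pvFind_insertBy w _ hpair, hfind]
      by_cases hw : pvP w = true
      · have hw' : PySem.Set.len (PySem.Set.ofList w.toList) = PySem.Str.len w := by
          unfold pvP at hw; exact eq_of_beq hw
        by_cases hpos : PySem.Str.len w > (0 : Int)
        · simp [PySem.Str.len_eq] at hw' hpos
          simp [pvSt, pvKey, PySem.Str.len_eq, hw, hw', hpos]
        · have hnil : w = "" := pvKey_zero (by simpa [pvKey] using hpos)
          subst hnil
          simp [pvSt, pvKey, PySem.Str.len_eq, hw]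
      · have hw' : ¬ PySem.Set.len (PySem.Set.ofList w.toList) = PySem.Str.len w := by
          intro hc; exact hw (by unfold pvP; exact beq_iff_eq.mpr hc)
        simp [pvKey, PySem.Str.len_eq] at hw'
        simp [pvSt, pvKey, PySem.Str.len_eq, hw, hw']

-- ===== VERDICT (by name: the statement is the Claim_ definition above) =====
theorem longest_word_without_duplicates_spec : Claim_equal_longest_word_without_duplicates := by
  intro sentence _
  unfold Spec_longest_word_without_duplicates longest_word_without_duplicates
    longest_word_without_duplicates_alt
  have h := pvInvariant (PySem.Str.split₀ sentence)
  rw [show (fun w => PySem.Set.len (PySem.Set.ofList w.toList) == PySem.Str.len w) = pvP from rfl,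
    show (fun w : String => PySem.Str.len w) = pvKey from rfl]
  cases hfind : (PySem.List.sorted (PySem.Str.split₀ sentence) pvKey true).find? pvP with
  | some b =>
    rw [hfind] at h
    simpa [pvSt, hfind] using congrArg Prod.fst h
  | none =>
    rw [hfind] at h
    simpa [pvSt, hfind] using congrArg Prod.fst h
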